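-- pv_equiv track=rewrite | github.com/chong-yao/competitive-programming | MCC2024/6 XOR The String.py | solve
-- ===== SOURCE A (Python) =====
-- MOD = 998244353
--
-- def solve(n, k, s):
--     # Reduce k modulo (MOD-1) to handle large exponents
--     k = k % (MOD - 1)
--
--     # Precompute the modular inverse of 3
--     inv3 = pow(3, MOD - 2, MOD)
--
--     # Precompute 2^k % MOD
--     pow2k = pow(2, k, MOD)
--
--     # Compute (-1)^k modulo MOD
--     if k % 2 == 0:
--         minus_one_pow_k = 1
--     else:
--         minus_one_pow_k = MOD - 1  # Since -1 % MOD = MOD - 1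
--
--     # Compute beauty values using modular arithmetic
--
--     # For '11'
--     numerator_11 = (pow2k + 2 * minus_one_pow_k) % MOD
--     beauty_11 = (numerator_11 * inv3) % MOD
--
--     # For '01' and '10'
--     numerator_01 = (pow2k - minus_one_pow_k + MOD) % MOD  # Ensure non-negative
--     beauty_01 = (numerator_01 * inv3) % MOD
--
--     # For '00'
--     beauty_00 = pow2k % MOD
--
--     arr = []
--     for i in range(1, n):
--         tmp = s[i - 1] + s[i]
--         if tmp == '00':
--             arr.append(beauty_00)
--         elif tmp == '11':
--             arr.append(beauty_11)
--         else:
--             arr.append(beauty_01)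
--
--     n -= 1  # Adjust n since we're dealing with adjacent pairs
--     ans = 0
--     for i in range(n):
--         contrib = arr[i] * (n - i) * (i + 1)
--         ans = (ans + contrib) % MOD
--
--     return ans
-- ===== SOURCE B (Python) =====
-- MOD = 998244353
--
-- def _s1(m):
--     # sum of 0..m-1
--     return m * (m - 1) // 2
--
-- def _s2(m):
--     # sum of squares 0..m-1
--     return (m - 1) * m * (2 * m - 1) // 6
--
-- def _range_weight(n, lo, hi):
--     # closed form for sum of (n - i) * i over lo <= i < hi
--     return n * (_s1(hi) - _s1(lo)) - (_s2(hi) - _s2(lo))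
--
-- def _add_run(c, w, w00, w11, w01):
--     # credit weight w of a run of character c to the matching accumulator
--     if c == '0':
--         return w00 + w, w11, w01
--     if c == '1':
--         return w00, w11 + w, w01
--     return w00, w11, w01 + w
--
-- def solve(n, k, s):
--     k = k % (MOD - 1)
--     inv3 = pow(3, MOD - 2, MOD)
--     pow2k = pow(2, k, MOD)
--     minus_one_pow_k = 1 if k % 2 == 0 else MOD - 1
--     beauty_11 = (pow2k + 2 * minus_one_pow_k) % MOD * inv3 % MOD
--     beauty_01 = (pow2k - minus_one_pow_k + MOD) % MOD * inv3 % MOD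
--     beauty_00 = pow2k % MOD
--     # Run-length decomposition with a two-pointer scan: jump from run start to
--     # run start; the internal (equal) pairs of each maximal run are summed with
--     # the closed-form arithmetic-series formula, and each run boundary is the
--     # mixed pair following the run (at the end of the string j == n and the
--     # boundary weight (n - j) * j is 0, so no special case is needed).
--     w00, w11, w01 = 0, 0, 0
--     i = 0
--     while i < n - 1:
--         j = i + 1
--         while j < n and s[j] == s[i]:
--             j += 1
--         w00, w11, w01 = _add_run(s[i], _range_weight(n, i + 1, j), w00, w11, w01)
--         w01 += (n - j) * j
--         i = j
--     return (beauty_00 * w00 + beauty_11 * w11 + beauty_01 * w01) % MOD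
-- ===== Notes on version B (the rewrite author's own statement) =====
-- stated objective: alternative
-- what changed: B replaces A's per-pair beauty list and second weighting loop by a run-length two-pointer scan: an inner loop jumps from run start to run start, each maximal run's internal equal pairs are added with a closed-form arithmetic-series formula (_range_weight), each run boundary contributes the single mixed pair, and the three class weight sums are combined with the beauty constants in one final mod.
import Mathlib
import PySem

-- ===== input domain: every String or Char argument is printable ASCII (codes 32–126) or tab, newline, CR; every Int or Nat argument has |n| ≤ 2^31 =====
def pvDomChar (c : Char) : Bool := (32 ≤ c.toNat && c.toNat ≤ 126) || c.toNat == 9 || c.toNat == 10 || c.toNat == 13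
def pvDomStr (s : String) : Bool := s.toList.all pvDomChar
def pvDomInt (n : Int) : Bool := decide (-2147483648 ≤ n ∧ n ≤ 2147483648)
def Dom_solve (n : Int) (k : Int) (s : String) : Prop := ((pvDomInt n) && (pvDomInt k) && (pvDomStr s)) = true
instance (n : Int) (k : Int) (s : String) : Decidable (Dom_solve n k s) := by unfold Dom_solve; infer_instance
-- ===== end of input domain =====

-- B replaces A's per-pair list/weighting loops by a run-length decomposition of the string:
-- internal pairs of each maximal character run are summed with a closed-form arithmetic-series
-- formula, only run boundaries are handled individually (objective: alternative algorithm).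

-- ===== PORT A =====
def pvMOD : Int := 998244353

def solve (n : Int) (k : Int) (s : String) : Int :=
  let k2 := PySem.Int.mod k (pvMOD - 1)
  let inv3 := PySem.Int.powMod 3 (pvMOD - 2).toNat pvMOD        -- exponent MOD-2 ≥ 0
  let pow2k := PySem.Int.powMod 2 k2.toNat pvMOD                -- k2 = k % (MOD-1) ≥ 0
  let minus_one_pow_k : Int := if PySem.Int.mod k2 2 = 0 then 1 else pvMOD - 1
  let numerator_11 := PySem.Int.mod (pow2k + 2 * minus_one_pow_k) pvMOD
  let beauty_11 := PySem.Int.mod (numerator_11 * inv3) pvMOD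
  let numerator_01 := PySem.Int.mod (pow2k - minus_one_pow_k + pvMOD) pvMOD
  let beauty_01 := PySem.Int.mod (numerator_01 * inv3) pvMOD
  let beauty_00 := PySem.Int.mod pow2k pvMOD
  let arr := (PySem.List.pyRange 1 n 1).foldl (fun arr i =>
      -- tmp = s[i-1] + s[i]; Pre_solve keeps both indices in range, where getD is exact
      let tmp : List Char := [(PySem.Str.pyGet? s (i - 1)).getD ' ', (PySem.Str.pyGet? s i).getD ' ']
      if tmp = ['0', '0'] then arr ++ [beauty_00]
      else if tmp = ['1', '1'] then arr ++ [beauty_11]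
      else arr ++ [beauty_01]) ([] : List Int)
  let n1 := n - 1
  (PySem.List.pyRange 0 n1 1).foldl (fun ans i =>
      PySem.Int.mod (ans + PySem.List.pyGetD arr i 0 * (n1 - i) * (i + 1)) pvMOD) 0

-- ===== PORT B =====
-- Source B's _s1 / _s2 / _range_weight: closed-form Σ i and Σ i² below m, weight sum over [lo,hi)
def pvS1 (m : Int) : Int := PySem.Int.floordiv (m * (m - 1)) 2
def pvS2 (m : Int) : Int := PySem.Int.floordiv ((m - 1) * m * (2 * m - 1)) 6
def pvRangeWeight (n lo hi : Int) : Int := n * (pvS1 hi - pvS1 lo) - (pvS2 hi - pvS2 lo)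

-- Source B's _add_run: credit weight w of a run of character c to the matching accumulator
def pvAddRun (c : Char) (w : Int) (t : Int × Int × Int) : Int × Int × Int :=
  if c = '0' then (t.1 + w, t.2.1, t.2.2)
  else if c = '1' then (t.1, t.2.1 + w, t.2.2)
  else (t.1, t.2.1, t.2.2 + w)

-- the inner while loop: advance j to the end of the run of character c (first j with
-- j == n or s[j] != c); termination lemma pv_findEnd_ge is cited by pvRuns below
def pvFindEnd (ch : Int → Char) (n : Int) (c : Char) (j : Int) : Int :=
  if j < n ∧ ch j = c then pvFindEnd ch n c (j + 1) else j
termination_by (n - j).toNat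
decreasing_by omega

theorem pv_findEnd_ge (ch : Int → Char) (n : Int) (c : Char) :
    ∀ (K : Nat) (j0 : Int), (n - j0).toNat ≤ K → j0 ≤ pvFindEnd ch n c j0 := by
  intro K
  induction K with
  | zero =>
    intro j0 h
    unfold pvFindEnd
    rw [if_neg (by omega)]
  | succ K ih =>
    intro j0 h
    unfold pvFindEnd
    by_cases hc : j0 < n ∧ ch j0 = c
    · rw [if_pos hc]
      have := ih (j0 + 1) (by omega)
      omega
    · rw [if_neg hc]

-- the outer while loop: one recursive step per maximal run
def pvRuns (ch : Int → Char) (n : Int) (i : Int) (acc : Int × Int × Int) : Int × Int × Int :=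
  if i < n - 1 then
    let j := pvFindEnd ch n (ch i) (i + 1)
    let t := pvAddRun (ch i) (pvRangeWeight n (i + 1) j) acc
    pvRuns ch n j (t.1, t.2.1, t.2.2 + (n - j) * j)
  else acc
termination_by (n - 1 - i).toNat
decreasing_by
  have := pv_findEnd_ge ch n (ch i) (n - (i + 1)).toNat (i + 1) (le_refl _)
  omega

def solve_alt (n : Int) (k : Int) (s : String) : Int :=
  let k2 := PySem.Int.mod k (pvMOD - 1)
  let inv3 := PySem.Int.powMod 3 (pvMOD - 2).toNat pvMOD
  let pow2k := PySem.Int.powMod 2 k2.toNat pvMOD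
  let minus_one_pow_k : Int := if PySem.Int.mod k2 2 = 0 then 1 else pvMOD - 1
  let beauty_11 := PySem.Int.mod (PySem.Int.mod (pow2k + 2 * minus_one_pow_k) pvMOD * inv3) pvMOD
  let beauty_01 := PySem.Int.mod (PySem.Int.mod (pow2k - minus_one_pow_k + pvMOD) pvMOD * inv3) pvMOD
  let beauty_00 := PySem.Int.mod pow2k pvMOD
  -- two-pointer run scan; s[i] via pyGet?, exact inside Pre_solve
  let t := pvRuns (fun i => (PySem.Str.pyGet? s i).getD ' ') n 0 (0, 0, 0)
  PySem.Int.mod (beauty_00 * t.1 + beauty_11 * t.2.1 + beauty_01 * t.2.2) pvMOD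

-- ===== PRECONDITION & SPEC =====
-- Pre_ excludes exactly the inputs where A raises IndexError: n ≥ 2 with n > len(s)
-- (the loop reads s[0..n-1]).
def Pre_solve (n : Int) (k : Int) (s : String) : Prop := n ≤ PySem.Str.len s ∨ n ≤ 1
instance (n : Int) (k : Int) (s : String) : Decidable (Pre_solve n k s) := by unfold Pre_solve; infer_instance
def pvWitness_solve : Int × Int × String := (3, 5, "010")

def Spec_solve (n : Int) (k : Int) (s : String) (out : Int) : Prop := out = solve_alt n k s
instance (n : Int) (k : Int) (s : String) (out : Int) : Decidable (Spec_solve n k s out) := by unfold Spec_solve; infer_instance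

-- ===== CLAIM (what is proved, stated in full; the proofs are below) =====
def Claim_equal_solve : Prop := ∀ (n : Int) (k : Int) (s : String), Dom_solve n k s → Pre_solve n k s → Spec_solve n k s (solve n k s)

-- ===== LEMMAS AND PROOFS =====

-- proof-only abbreviations
def pvWt (n i : Int) : Int := (n - i) * i
def pvSW (n lo hi : Int) : Int := ((PySem.List.pyRange lo hi 1).map (pvWt n)).sum
def pvBcls (b00 b11 b01 : Int) (p : List Char) : Int :=
  if p = ['0', '0'] then b00 else if p = ['1', '1'] then b11 else b01
def pvBchar (b00 b11 b01 : Int) (c : Char) : Int :=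
  if c = '0' then b00 else if c = '1' then b11 else b01
def pvComb (b00 b11 b01 : Int) (t : Int × Int × Int) : Int := b00 * t.1 + b11 * t.2.1 + b01 * t.2.2
-- the per-pair classified weighted sum over pair positions 1..hi-1
def pvPS (ch : Int → Char) (n b00 b11 b01 hi : Int) : Int :=
  ((PySem.List.pyRange 1 hi 1).map (fun i => pvBcls b00 b11 b01 [ch (i - 1), ch i] * pvWt n i)).sum

theorem pvSW_nil (n lo hi : Int) (h : hi ≤ lo) : pvSW n lo hi = 0 := by
  unfold pvSW; rw [PySem.List.pyRange_one_eq_nil h]; simp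

theorem pvSW_succ (n lo hi : Int) (h : lo ≤ hi) : pvSW n lo (hi + 1) = pvSW n lo hi + pvWt n hi := by
  unfold pvSW
  rw [PySem.List.pyRange_one_succ_right h, List.map_append, List.sum_append]; simp

-- telescoping of the closed forms
theorem pv_s1_succ (h : Int) : pvS1 (h + 1) = pvS1 h + h := by
  unfold pvS1
  rw [PySem.Int.floordiv_eq_ediv_of_pos (by norm_num), PySem.Int.floordiv_eq_ediv_of_pos (by norm_num)]
  rw [show (h + 1) * (h + 1 - 1) = h * (h - 1) + h * 2 by ring,
    Int.add_mul_ediv_right _ _ (by norm_num : (2 : Int) ≠ 0)]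

theorem pv_s2_succ (h : Int) : pvS2 (h + 1) = pvS2 h + h * h := by
  unfold pvS2
  rw [PySem.Int.floordiv_eq_ediv_of_pos (by norm_num), PySem.Int.floordiv_eq_ediv_of_pos (by norm_num)]
  rw [show (h + 1 - 1) * (h + 1) * (2 * (h + 1) - 1) = (h - 1) * h * (2 * h - 1) + (h * h) * 6 by ring,
    Int.add_mul_ediv_right _ _ (by norm_num : (6 : Int) ≠ 0)]

theorem pv_rw_eq_aux (n : Int) : ∀ (d : Nat) (lo : Int), pvRangeWeight n lo (lo + d) = pvSW n lo (lo + d) := by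
  intro d
  induction d with
  | zero =>
    intro lo
    simp only [Nat.cast_zero, add_zero]
    rw [pvSW_nil n lo lo le_rfl]
    unfold pvRangeWeight; ring
  | succ d ih =>
    intro lo
    rw [show lo + ((d + 1 : Nat) : Int) = (lo + d) + 1 from by push_cast; ring]
    rw [pvSW_succ n lo (lo + d) (by omega)]
    have hih := ih lo
    unfold pvRangeWeight at hih ⊢
    rw [pv_s1_succ (lo + d), pv_s2_succ (lo + d)]
    have hwt : pvWt n (lo + (d : Int)) = (n - (lo + d)) * (lo + d) := rfl
    rw [hwt]
    linear_combination hih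

theorem pv_rw_eq (n lo hi : Int) (h : lo ≤ hi) : pvRangeWeight n lo hi = pvSW n lo hi := by
  have he : hi = lo + ((hi - lo).toNat : Int) := by omega
  rw [he]; exact pv_rw_eq_aux n _ lo

-- bucket bookkeeping
theorem pv_comb_addRun (b00 b11 b01 : Int) (c : Char) (w : Int) (t : Int × Int × Int) :
    pvComb b00 b11 b01 (pvAddRun c w t) = pvComb b00 b11 b01 t + pvBchar b00 b11 b01 c * w := by
  unfold pvAddRun pvComb pvBchar
  split_ifs <;> simp <;> ring

theorem pv_bcls_pair (b00 b11 b01 : Int) (c : Char) :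
    pvBcls b00 b11 b01 [c, c] = pvBchar b00 b11 b01 c := by
  unfold pvBcls pvBchar
  by_cases h0 : c = '0'
  · simp [h0]
  · by_cases h1 : c = '1'
    · simp [h1]
    · simp [h0, h1]

theorem pv_bcls_mixed (b00 b11 b01 : Int) (a b : Char) (h : a ≠ b) :
    pvBcls b00 b11 b01 [a, b] = b01 := by
  unfold pvBcls
  rw [if_neg, if_neg]
  · intro he; injection he with h1 h2; injection h2 with h2 _; exact h (h1.trans h2.symm)
  · intro he; injection he with h1 h2; injection h2 with h2 _; exact h (h1.trans h2.symm)

-- full specification of the inner while loop: it stays in [j0, n] (when started within),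
-- the characters it skips all equal c, and it stops at n or at a differing character
theorem pv_findEnd_spec (ch : Int → Char) (n : Int) (c : Char) :
    ∀ (K : Nat) (j0 : Int), (n - j0).toNat ≤ K →
      (j0 ≤ n → pvFindEnd ch n c j0 ≤ n) ∧
      (∀ p, j0 ≤ p → p < pvFindEnd ch n c j0 → ch p = c) ∧
      ¬(pvFindEnd ch n c j0 < n ∧ ch (pvFindEnd ch n c j0) = c) := by
  intro K
  induction K with
  | zero =>
    intro j0 h
    have he : pvFindEnd ch n c j0 = j0 := by
      unfold pvFindEnd; rw [if_neg (by omega)]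
    rw [he]
    exact ⟨fun h => h, fun p h1 h2 => absurd h1 (by omega), by omega⟩
  | succ K ih =>
    intro j0 h
    by_cases hc : j0 < n ∧ ch j0 = c
    · have he : pvFindEnd ch n c j0 = pvFindEnd ch n c (j0 + 1) := by
        conv_lhs => unfold pvFindEnd
        rw [if_pos hc]
      obtain ⟨ih1, ih2, ih3⟩ := ih (j0 + 1) (by omega)
      rw [he]
      refine ⟨fun _ => ih1 (by omega), ?_, ih3⟩
      intro p h1 h2
      by_cases hp : j0 + 1 ≤ p
      · exact ih2 p hp h2
      · have : p = j0 := by omega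
        rw [this]; exact hc.2
    · have he : pvFindEnd ch n c j0 = j0 := by
        unfold pvFindEnd; rw [if_neg hc]
      rw [he]
      exact ⟨fun h => h, fun p h1 h2 => absurd h1 (by omega), hc⟩

-- a run of equal characters contributes bchar(c) times its weight sum
theorem pv_run_sum (ch : Int → Char) (n b00 b11 b01 : Int) (c : Char) :
    ∀ (d : Nat) (lo : Int), (∀ p, lo - 1 ≤ p → p < lo + d → ch p = c) →
      ((PySem.List.pyRange lo (lo + (d : Int)) 1).map
          (fun p => pvBcls b00 b11 b01 [ch (p - 1), ch p] * pvWt n p)).sum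
        = pvBchar b00 b11 b01 c * pvSW n lo (lo + (d : Int)) := by
  intro d
  induction d with
  | zero =>
    intro lo _
    rw [show lo + ((0 : Nat) : Int) = lo from by push_cast; ring]
    rw [PySem.List.pyRange_one_eq_nil le_rfl, pvSW_nil n lo lo le_rfl]
    simp
  | succ d ih =>
    intro lo hall
    rw [show lo + ((d + 1 : Nat) : Int) = (lo + (d : Int)) + 1 from by push_cast; ring]
    rw [PySem.List.pyRange_one_succ_right (by omega), pvSW_succ n lo (lo + (d : Int)) (by omega),
      List.map_append, List.sum_append]
    simp only [List.map_cons, List.map_nil, List.sum_cons, List.sum_nil, add_zero]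
    have h1 : ch ((lo + (d : Int)) - 1) = c := hall _ (by omega) (by push_cast; omega)
    have h2 : ch (lo + (d : Int)) = c := hall _ (by omega) (by push_cast; omega)
    rw [h1, h2, pv_bcls_pair,
      ih lo (fun p hp1 hp2 => hall p hp1 (by push_cast at hp2 ⊢; omega))]
    ring

-- correctness of the outer loop: starting at i it accounts exactly for the pairs right of i
theorem pv_runs_sum (ch : Int → Char) (n b00 b11 b01 : Int) :
    ∀ (K : Nat) (i : Int) (acc : Int × Int × Int), (n - 1 - i).toNat ≤ K →
      pvComb b00 b11 b01 (pvRuns ch n i acc)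
        = pvComb b00 b11 b01 acc
          + ((PySem.List.pyRange (i + 1) n 1).map
              (fun p => pvBcls b00 b11 b01 [ch (p - 1), ch p] * pvWt n p)).sum := by
  intro K
  induction K with
  | zero =>
    intro i acc h
    have he : pvRuns ch n i acc = acc := by
      unfold pvRuns; rw [if_neg (by omega)]
    rw [he, PySem.List.pyRange_one_eq_nil (by omega)]
    simp
  | succ K ih =>
    intro i acc h
    by_cases hi : i < n - 1
    · set j := pvFindEnd ch n (ch i) (i + 1) with hj
      have hge : i + 1 ≤ j := pv_findEnd_ge ch n (ch i) (n - (i + 1)).toNat (i + 1) (le_refl _)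
      obtain ⟨hle', hrun, hstop⟩ :=
        pv_findEnd_spec ch n (ch i) (n - (i + 1)).toNat (i + 1) (le_refl _)
      have hjn : j ≤ n := hle' (by omega)
      have he : pvRuns ch n i acc = pvRuns ch n j
          ((pvAddRun (ch i) (pvRangeWeight n (i + 1) j) acc).1,
           (pvAddRun (ch i) (pvRangeWeight n (i + 1) j) acc).2.1,
           (pvAddRun (ch i) (pvRangeWeight n (i + 1) j) acc).2.2 + (n - j) * j) := by
        conv_lhs => unfold pvRuns
        rw [if_pos hi]
      rw [he, ih j _ (by omega)]
      -- split the pair range at j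
      have hsplit : PySem.List.pyRange (i + 1) n 1
          = PySem.List.pyRange (i + 1) j 1 ++ PySem.List.pyRange j n 1 :=
        PySem.List.pyRange_one_append (i + 1) j n (by omega) hjn
      rw [hsplit, List.map_append, List.sum_append]
      -- the run part: characters i .. j-1 all equal ch i
      have hallrun : ∀ p, (i + 1) - 1 ≤ p → p < (i + 1) + ((j - (i + 1)).toNat : Int) → ch p = ch i := by
        intro p hp1 hp2
        by_cases hpi : p = i
        · rw [hpi]
        · exact hrun p (by omega) (by omega)
      have hrs := pv_run_sum ch n b00 b11 b01 (ch i) (j - (i + 1)).toNat (i + 1) hallrun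
      rw [show (i + 1) + (((j - (i + 1)).toNat : Nat) : Int) = j from by omega] at hrs
      have hca := pv_comb_addRun b00 b11 b01 (ch i) (pvRangeWeight n (i + 1) j) acc
      have hrw : pvRangeWeight n (i + 1) j = pvSW n (i + 1) j := pv_rw_eq n _ _ (by omega)
      -- the boundary part: either j = n (empty, weight 0) or a mixed pair of weight (n-j)*j
      by_cases hjlt : j < n
      · have hbd : PySem.List.pyRange j n 1 = j :: PySem.List.pyRange (j + 1) n 1 :=
          PySem.List.pyRange_one_cons hjlt
        have hmid : pvBcls b00 b11 b01 [ch (j - 1), ch j] = b01 := by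
          apply pv_bcls_mixed
          intro heq
          have hj1 : ch (j - 1) = ch i := by
            by_cases hji : j - 1 = i
            · rw [hji]
            · exact hrun (j - 1) (by omega) (by omega)
          exact hstop ⟨hjlt, by rw [← heq, hj1]⟩
        rw [hbd]
        simp only [List.map_cons, List.sum_cons]
        rw [hmid, hrs]
        unfold pvComb at hca ⊢
        simp only at hca ⊢
        rw [hrw] at hca ⊢
        have hwt : pvWt n j = (n - j) * j := rfl
        rw [hwt]
        linear_combination hca
      · have hjn' : j = n := by omega
        have hbd : PySem.List.pyRange j n 1 = [] := PySem.List.pyRange_one_eq_nil (by omega)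
        rw [hbd]
        simp only [List.map_nil, List.sum_nil, add_zero]
        rw [hrs]
        unfold pvComb at hca ⊢
        simp only at hca ⊢
        rw [hrw] at hca ⊢
        have hz : (n - j) * j = 0 := by rw [hjn']; ring
        have hz2 : ((PySem.List.pyRange (j + 1) n 1).map
            (fun p => pvBcls b00 b11 b01 [ch (p - 1), ch p] * pvWt n p)).sum = 0 := by
          rw [PySem.List.pyRange_one_eq_nil (by omega)]; simp
        linear_combination hca + b01 * hz + hz2
    · have he : pvRuns ch n i acc = acc := by
        unfold pvRuns; rw [if_neg hi]
      rw [he, PySem.List.pyRange_one_eq_nil (by omega)]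
      simp

-- A's second loop: a running 'ans = (ans + c i) % MOD' fold equals one final mod of the plain sum.
theorem pv_mod_fold (c : Int → Int) : ∀ (l : List Int) (a : Int),
    l.foldl (fun ans i => PySem.Int.mod (ans + c i) pvMOD) (PySem.Int.mod a pvMOD)
      = PySem.Int.mod (a + (l.map c).sum) pvMOD := by
  intro l
  induction l with
  | nil => simp
  | cons x xs ih =>
    intro a
    simp only [List.foldl_cons, List.map_cons, List.sum_cons]
    have hp : (0 : Int) < pvMOD := by decide
    have h : PySem.Int.mod (PySem.Int.mod a pvMOD + c x) pvMOD = PySem.Int.mod (a + c x) pvMOD := by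
      simp only [PySem.Int.mod_eq_emod_of_pos hp]
      exact Int.emod_add_emod _ _ _
    rw [h, ih (a + c x), ← add_assoc]

theorem pv_mod_fold0 (c : Int → Int) (l : List Int) :
    l.foldl (fun ans i => PySem.Int.mod (ans + c i) pvMOD) 0
      = PySem.Int.mod ((l.map c).sum) pvMOD := by
  have h := pv_mod_fold c l 0
  rw [show PySem.Int.mod 0 pvMOD = 0 from by decide, zero_add] at h
  exact h

-- reindexing A's weighted sum over arr (indices 0..n-2) as a sum over pair positions 1..n-1
theorem pv_reindex (n : Int) (f : Int → Int) :
    ((PySem.List.pyRange 0 (n - 1) 1).map (fun i =>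
        PySem.List.pyGetD ((PySem.List.pyRange 1 n 1).map f) i 0 * ((n - 1) - i) * (i + 1))).sum
      = ((PySem.List.pyRange 1 n 1).map (fun i => f i * ((n - i) * i))).sum := by
  set arr := (PySem.List.pyRange 1 n 1).map f with harr
  rw [PySem.List.pyRange_one 0 (n - 1), PySem.List.pyRange_one 1 n, List.map_map, List.map_map]
  simp only [sub_zero]
  apply congrArg
  apply List.map_congr_left
  intro k hk
  simp only [List.mem_range] at hk
  simp only [Function.comp_apply, zero_add]
  rw [harr, PySem.List.pyGetD_map_pyRange_one f 1 n k 0 (by omega)]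
  ring

-- A as one final mod of the per-pair classified weighted sum
theorem pv_A_eq (n b00 b11 b01 : Int) (ch : Int → Char) :
    (PySem.List.pyRange 0 (n - 1) 1).foldl (fun ans i =>
        PySem.Int.mod (ans + PySem.List.pyGetD
          ((PySem.List.pyRange 1 n 1).foldl (fun arr i =>
              if [ch (i - 1), ch i] = ['0', '0'] then arr ++ [b00]
              else if [ch (i - 1), ch i] = ['1', '1'] then arr ++ [b11]
              else arr ++ [b01]) ([] : List Int)) i 0 * ((n - 1) - i) * (i + 1)) pvMOD) 0
    = PySem.Int.mod (pvPS ch n b00 b11 b01 n) pvMOD := by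
  have hfun : (fun (arr : List Int) i =>
      if [ch (i - 1), ch i] = ['0', '0'] then arr ++ [b00]
      else if [ch (i - 1), ch i] = ['1', '1'] then arr ++ [b11]
      else arr ++ [b01])
      = (fun arr i => arr ++ [pvBcls b00 b11 b01 [ch (i - 1), ch i]]) := by
    funext arr i; unfold pvBcls; split_ifs <;> rfl
  rw [hfun, PySem.List.foldl_append_singleton_eq_map, List.nil_append]
  rw [pv_mod_fold0, pv_reindex n (fun i => pvBcls b00 b11 b01 [ch (i - 1), ch i])]
  unfold pvPS pvWt
  rfl

-- B's two-pointer run scan as one mod of the same per-pair sum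
theorem pv_B_eq (n b00 b11 b01 : Int) (ch : Int → Char) :
    PySem.Int.mod
        (b00 * (pvRuns ch n 0 ((0, 0, 0) : Int × Int × Int)).1
          + b11 * (pvRuns ch n 0 ((0, 0, 0) : Int × Int × Int)).2.1
          + b01 * (pvRuns ch n 0 ((0, 0, 0) : Int × Int × Int)).2.2) pvMOD
    = PySem.Int.mod (pvPS ch n b00 b11 b01 n) pvMOD := by
  have h := pv_runs_sum ch n b00 b11 b01 (n - 1).toNat 0 ((0, 0, 0) : Int × Int × Int) (by omega)
  rw [show (0 : Int) + 1 = 1 from by ring] at h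
  unfold pvComb at h
  simp only at h
  congr 1
  unfold pvPS
  linear_combination h

-- ===== VERDICT (by name: the statement is the Claim_ definition above) =====
theorem solve_spec : Claim_equal_solve := by
  intro n k s _ _
  show solve n k s = solve_alt n k s
  exact (pv_A_eq n
      (PySem.Int.mod (PySem.Int.powMod 2 (PySem.Int.mod k (pvMOD - 1)).toNat pvMOD) pvMOD)
      (PySem.Int.mod (PySem.Int.mod (PySem.Int.powMod 2 (PySem.Int.mod k (pvMOD - 1)).toNat pvMOD
          + 2 * (if PySem.Int.mod (PySem.Int.mod k (pvMOD - 1)) 2 = 0 then (1 : Int) else pvMOD - 1)) pvMOD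
        * PySem.Int.powMod 3 (pvMOD - 2).toNat pvMOD) pvMOD)
      (PySem.Int.mod (PySem.Int.mod (PySem.Int.powMod 2 (PySem.Int.mod k (pvMOD - 1)).toNat pvMOD
          - (if PySem.Int.mod (PySem.Int.mod k (pvMOD - 1)) 2 = 0 then (1 : Int) else pvMOD - 1) + pvMOD) pvMOD
        * PySem.Int.powMod 3 (pvMOD - 2).toNat pvMOD) pvMOD)
      (fun i => (PySem.Str.pyGet? s i).getD ' ')).trans
    (pv_B_eq n
      (PySem.Int.mod (PySem.Int.powMod 2 (PySem.Int.mod k (pvMOD - 1)).toNat pvMOD) pvMOD)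
      (PySem.Int.mod (PySem.Int.mod (PySem.Int.powMod 2 (PySem.Int.mod k (pvMOD - 1)).toNat pvMOD
          + 2 * (if PySem.Int.mod (PySem.Int.mod k (pvMOD - 1)) 2 = 0 then (1 : Int) else pvMOD - 1)) pvMOD
        * PySem.Int.powMod 3 (pvMOD - 2).toNat pvMOD) pvMOD)
      (PySem.Int.mod (PySem.Int.mod (PySem.Int.powMod 2 (PySem.Int.mod k (pvMOD - 1)).toNat pvMOD
          - (if PySem.Int.mod (PySem.Int.mod k (pvMOD - 1)) 2 = 0 then (1 : Int) else pvMOD - 1) + pvMOD) pvMOD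
        * PySem.Int.powMod 3 (pvMOD - 2).toNat pvMOD) pvMOD)
      (fun i => (PySem.Str.pyGet? s i).getD ' ')).symm
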